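-- pv_equiv track=rewrite | github.com/kmercy-afk/mypythonwebproject | python refactoring.py | suggest_method_name
-- ===== SOURCE A (Python) =====
-- def suggest_method_name(process_desc):
--     """Suggest a relevant method name based on process description."""
--     words = process_desc.lower().split()
--     if any(word in words for word in ['calculate', 'compute']):
--         return 'calculate_' + '_'.join(words[:2])
--     elif any(word in words for word in ['split', 'extract']):
--         return 'extract_' + '_'.join(words[1:3])
--     else:
--         return 'process_' + '_'.join(words[:2])
-- ===== SOURCE B (Python) =====
-- _ACTIONS = [('calculate_', 0, 2), ('extract_', 1, 3), ('process_', 0, 2)]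
--
--
-- def _category(word):
--     """Priority class of a single word: 0 strongest, 2 = no keyword."""
--     if word in ('calculate', 'compute'):
--         return 0
--     if word in ('split', 'extract'):
--         return 1
--     return 2
--
--
-- def suggest_method_name(process_desc):
--     """Suggest a relevant method name based on process description."""
--     words = process_desc.lower().split()
--     cat = 2
--     for w in words:
--         cat = min(cat, _category(w))
--     prefix, start, stop = _ACTIONS[cat]
--     return prefix + '_'.join(words[start:stop])
-- ===== Notes on version B (the rewrite author's own statement) =====
-- stated objective: alternative
-- what changed: Instead of scanning the word list once per keyword in an if/elif chain, B classifies each word into a numeric priority class in one pass, folds min over those classes, and indexes an action table with the resulting class.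
import Mathlib
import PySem

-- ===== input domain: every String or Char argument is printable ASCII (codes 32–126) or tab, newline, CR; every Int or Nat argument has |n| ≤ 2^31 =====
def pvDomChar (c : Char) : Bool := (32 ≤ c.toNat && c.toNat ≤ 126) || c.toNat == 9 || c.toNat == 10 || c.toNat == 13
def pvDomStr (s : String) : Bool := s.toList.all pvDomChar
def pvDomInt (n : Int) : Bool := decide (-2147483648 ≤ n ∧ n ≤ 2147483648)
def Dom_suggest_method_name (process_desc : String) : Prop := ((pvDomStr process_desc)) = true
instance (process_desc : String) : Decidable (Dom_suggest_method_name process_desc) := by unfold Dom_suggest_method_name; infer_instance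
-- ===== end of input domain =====

-- B replaces A's per-keyword scans of the word list by a one-pass min-fold of per-word
-- priority classes, then indexes an action table with the class (objective: alternative).

-- ===== PORT A =====
-- Port of A: literal if/elif chain over lowercase-split words.
def suggest_method_name (process_desc : String) : String :=
  let words := PySem.Str.split₀ (PySem.Str.lower process_desc)
  if ["calculate", "compute"].any (fun w => words.contains w) then
    "calculate_" ++ PySem.Str.join "_" (PySem.List.slice words none (some 2))
  else if ["split", "extract"].any (fun w => words.contains w) then
    "extract_" ++ PySem.Str.join "_" (PySem.List.slice words (some 1) (some 3))
  else
    "process_" ++ PySem.Str.join "_" (PySem.List.slice words none (some 2))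

-- ===== PORT B =====
-- B: classify each word (0/1/2), fold min over the words in one pass, index the action table.
def pvActions : List (String × Int × Int) :=
  [("calculate_", 0, 2), ("extract_", 1, 3), ("process_", 0, 2)]

def pvCategory (w : String) : Nat :=
  if w = "calculate" ∨ w = "compute" then 0
  else if w = "split" ∨ w = "extract" then 1
  else 2

def suggest_method_name_alt (process_desc : String) : String :=
  let words := PySem.Str.split₀ (PySem.Str.lower process_desc)
  let cat := words.foldl (fun a w => min a (pvCategory w)) 2
  -- _ACTIONS[cat]: cat ≤ 2 always, so the default is unreachable
  let act := pvActions.getD cat ("process_", 0, 2)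
  act.1 ++ PySem.Str.join "_" (PySem.List.slice words (some act.2.1) (some act.2.2))

-- ===== PRECONDITION & SPEC =====
def Spec_suggest_method_name (process_desc : String) (out : String) : Prop := out = suggest_method_name_alt process_desc
instance (process_desc : String) (out : String) : Decidable (Spec_suggest_method_name process_desc out) := by unfold Spec_suggest_method_name; infer_instance

-- ===== CLAIM =====
def Claim_equal_suggest_method_name : Prop := ∀ (process_desc : String), Dom_suggest_method_name process_desc → Spec_suggest_method_name process_desc (suggest_method_name process_desc)

-- ===== LEMMAS AND PROOFS =====
theorem pv_fold_cat (ws : List String) (acc : Nat) (hacc : acc ≤ 2) :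
    ws.foldl (fun a w => min a (pvCategory w)) acc =
      if "calculate" ∈ ws ∨ "compute" ∈ ws then 0
      else if "split" ∈ ws ∨ "extract" ∈ ws then min acc 1
      else acc := by
  induction ws generalizing acc with
  | nil => simp
  | cons h t ih =>
    simp only [List.foldl_cons, List.mem_cons]
    by_cases h1 : h = "calculate" ∨ h = "compute"
    · have hcat : pvCategory h = 0 := by simp [pvCategory, h1]
      have o1 : ("calculate" = h ∨ "calculate" ∈ t) ∨ "compute" = h ∨ "compute" ∈ t := by
        rcases h1 with h1 | h1
        · exact Or.inl (Or.inl h1.symm)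
        · exact Or.inr (Or.inl h1.symm)
      rw [hcat, Nat.min_zero, ih 0 (by omega), if_pos o1]
      split_ifs <;> omega
    · have hc1 : "calculate" ≠ h := fun e => h1 (Or.inl e.symm)
      have hc2 : "compute" ≠ h := fun e => h1 (Or.inr e.symm)
      by_cases h2 : h = "split" ∨ h = "extract"
      · have hcat : pvCategory h = 1 := by simp [pvCategory, h1, h2]
        have o2 : ("split" = h ∨ "split" ∈ t) ∨ "extract" = h ∨ "extract" ∈ t := by
          rcases h2 with h2 | h2
          · exact Or.inl (Or.inl h2.symm)
          · exact Or.inr (Or.inl h2.symm)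
        rw [hcat, ih (min acc 1) (by omega)]
        by_cases hct : "calculate" ∈ t ∨ "compute" ∈ t
        · rw [if_pos hct, if_pos (by tauto :
            ("calculate" = h ∨ "calculate" ∈ t) ∨ "compute" = h ∨ "compute" ∈ t)]
        · rw [if_neg hct, if_neg (by tauto :
            ¬ (("calculate" = h ∨ "calculate" ∈ t) ∨ "compute" = h ∨ "compute" ∈ t)),
            if_pos o2]
          by_cases hst : "split" ∈ t ∨ "extract" ∈ t
          · rw [if_pos hst]; omega
          · rw [if_neg hst]
      · have hs1 : "split" ≠ h := fun e => h2 (Or.inl e.symm)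
        have hs2 : "extract" ≠ h := fun e => h2 (Or.inr e.symm)
        have hcat : pvCategory h = 2 := by simp [pvCategory, h1, h2]
        have hmin : min acc 2 = acc := by omega
        rw [hcat, hmin, ih acc hacc]
        by_cases hct : "calculate" ∈ t ∨ "compute" ∈ t
        · rw [if_pos hct, if_pos (by tauto :
            ("calculate" = h ∨ "calculate" ∈ t) ∨ "compute" = h ∨ "compute" ∈ t)]
        · rw [if_neg hct, if_neg (by tauto :
            ¬ (("calculate" = h ∨ "calculate" ∈ t) ∨ "compute" = h ∨ "compute" ∈ t))]
          by_cases hst : "split" ∈ t ∨ "extract" ∈ t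
          · rw [if_pos hst, if_pos (by tauto :
              ("split" = h ∨ "split" ∈ t) ∨ "extract" = h ∨ "extract" ∈ t)]
          · rw [if_neg hst, if_neg (by tauto :
              ¬ (("split" = h ∨ "split" ∈ t) ∨ "extract" = h ∨ "extract" ∈ t))]

-- ===== VERDICT =====
theorem suggest_method_name_spec : Claim_equal_suggest_method_name := by
  intro s _
  simp only [Spec_suggest_method_name]
  unfold suggest_method_name suggest_method_name_alt
  simp only [pv_fold_cat _ 2 le_rfl]
  by_cases hc : "calculate" ∈ PySem.Str.split₀ (PySem.Str.lower s) ∨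
                "compute" ∈ PySem.Str.split₀ (PySem.Str.lower s) <;>
  by_cases hs : "split" ∈ PySem.Str.split₀ (PySem.Str.lower s) ∨
                "extract" ∈ PySem.Str.split₀ (PySem.Str.lower s) <;>
    simp [hc, hs, pvActions, List.getD]
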